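-- pv_equiv track=rewrite | github.com/Triton365/BlockState | data/blockstate/generator.py | listType
-- ===== SOURCE A (Python) =====
-- def listType(l):
--     assert len(l) >= 2
--     intList = []
--     strList = []
--     for x in l:
--         if x.isdigit():
--             intList.append(x)
--         else:
--             strList.append(x)
--     l.clear()
--     if len(intList) == 0:
--         l.extend(strList)
--         return 'str'
--     l.extend(sorted(map(int,intList)))
--     if len(strList) == 0:
--         return 'int'
--     l.extend(strList)
--     return 'mixed'
-- ===== SOURCE B (Python) =====
-- def listType(l):
--     assert len(l) >= 2
--     converted = [int(x) if x.isdigit() else x for x in l]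
--     converted.sort(key=lambda e: (1, 0) if isinstance(e, str) else (0, e))
--     l[:] = converted
--     has_int = any(isinstance(e, int) for e in converted)
--     has_str = any(isinstance(e, str) for e in converted)
--     if not has_int:
--         return 'str'
--     if not has_str:
--         return 'int'
--     return 'mixed'
-- ===== Notes on version B (the rewrite author's own statement) =====
-- stated objective: idiomatic
-- what changed: Replaces the manual two-list partition loop and the length-based branch chain with a comprehension + one stable key-sort for the in-place mutation and two any() scans for the classification; proved equivalence is about the return value (both versions also leave l with the same contents).
-- outside the precondition, e.g. on listType(['a']): A raises AssertionError, B raises AssertionError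
import Mathlib
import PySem

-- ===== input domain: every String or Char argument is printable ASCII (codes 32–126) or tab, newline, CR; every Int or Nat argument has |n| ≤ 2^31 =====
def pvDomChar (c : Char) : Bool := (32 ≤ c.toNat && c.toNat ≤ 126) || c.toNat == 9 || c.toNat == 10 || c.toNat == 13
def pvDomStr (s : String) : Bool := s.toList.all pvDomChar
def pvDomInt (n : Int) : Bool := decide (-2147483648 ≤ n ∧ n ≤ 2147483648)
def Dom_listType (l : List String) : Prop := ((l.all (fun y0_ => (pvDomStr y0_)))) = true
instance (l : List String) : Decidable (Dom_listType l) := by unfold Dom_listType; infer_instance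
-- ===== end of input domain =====

-- B replaces A's partition loop + length tests by a comprehension/sort for the mutation and two any() scans
-- for the classification; both Pythons mutate l identically, and the equivalence proved here is about the
-- RETURN value only.

-- ===== PORT A =====
-- the single loop appending each x to intList or strList, carried as a pair accumulator
def listType (l : List String) : String :=
  let p := l.foldl (fun (p : List String × List String) x =>
    if PySem.Str.strIsdigit x then (p.1 ++ [x], p.2) else (p.1, p.2 ++ [x])) ([], [])
  if p.1.length = 0 then "str"
  else if p.2.length = 0 then "int"
  else "mixed"

-- ===== PORT B =====
-- Source B's classification: has_int/has_str via any(); (the sort/mutation has no effect on the return value)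
def listType_alt (l : List String) : String :=
  let hasInt := l.any (fun x => PySem.Str.strIsdigit x)
  let hasStr := l.any (fun x => !(PySem.Str.strIsdigit x))
  if !hasInt then "str"
  else if !hasStr then "int"
  else "mixed"

-- ===== PRECONDITION & SPEC =====
-- A (and B) begin with `assert len(l) >= 2`: inputs of length < 2 raise AssertionError and are excluded.
def Pre_listType (l : List String) : Prop := 2 ≤ l.length
instance (l : List String) : Decidable (Pre_listType l) := by unfold Pre_listType; infer_instance
def pvWitness_listType : List String := ["12", "ab"]
def Spec_listType (l : List String) (out : String) : Prop := out = listType_alt l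
instance (l : List String) (out : String) : Decidable (Spec_listType l out) := by unfold Spec_listType; infer_instance

-- ===== CLAIM (what is proved, stated in full; the proofs are below) =====
def Claim_equal_listType : Prop := ∀ (l : List String), Dom_listType l → Pre_listType l → Spec_listType l (listType l)

-- ===== LEMMAS AND PROOFS =====

-- A's fold grows its two accumulators by exactly the digit / non-digit elements of l
theorem listType_foldl_eq (l : List String) (a b : List String) :
    l.foldl (fun (p : List String × List String) x =>
      if PySem.Str.strIsdigit x then (p.1 ++ [x], p.2) else (p.1, p.2 ++ [x])) (a, b)
    = (a ++ l.filter (fun x => PySem.Str.strIsdigit x),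
       b ++ l.filter (fun x => !(PySem.Str.strIsdigit x))) := by
  induction l generalizing a b with
  | nil => simp
  | cons x xs ih =>
    simp only [List.foldl_cons, List.filter_cons]
    by_cases h : PySem.Str.strIsdigit x = true <;>
      simp only [h, ih] <;> simp

-- ===== VERDICT (by name: the statement is the Claim_ definition above) =====
theorem listType_spec : Claim_equal_listType := by
  intro l _ _
  unfold Spec_listType listType listType_alt
  rw [listType_foldl_eq]
  by_cases hI : ∃ x ∈ l, PySem.Str.strIsdigit x = true <;>
    by_cases hS : ∃ x ∈ l, PySem.Str.strIsdigit x = false <;>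
    simp_all [List.length_eq_zero_iff, List.filter_eq_nil_iff]
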